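-- pv_equiv track=rewrite | github.com/DApIA-Project/Anomaly-Detection | A_Dataset/InterpolationDetector/gen_interpol_dataset.py | largest_under
-- ===== SOURCE A (Python) =====
-- def largest_under(a, u):
--     b, t = 0, len(a) - 1
--     while (t - b > 1):
--         m = ((t + b) +1) // 2
--
--         if (a[m] > u):
--             t = m
--         else:
--             b = m
--
--     res = b
--     # if (a[t] <= u):
--     #     res = t
--     return res
-- ===== SOURCE B (Python) =====
-- def largest_under(a, u):
--     # recursive decomposition: bounds (b, t) carried as parameters
--     def go(b, t):
--         if t - b <= 1:
--             return b
--         m = (b + t + 1) // 2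
--         if a[m] > u:
--             return go(b, m)
--         return go(m, t)
--     return go(0, len(a) - 1)
-- ===== Notes on version B (the rewrite author's own statement) =====
-- stated objective: alternative
-- what changed: The iterative while-loop binary search is rewritten as a recursive helper carrying the bounds (b, t) as accumulator parameters, with the base case t - b <= 1.
import Mathlib
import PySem

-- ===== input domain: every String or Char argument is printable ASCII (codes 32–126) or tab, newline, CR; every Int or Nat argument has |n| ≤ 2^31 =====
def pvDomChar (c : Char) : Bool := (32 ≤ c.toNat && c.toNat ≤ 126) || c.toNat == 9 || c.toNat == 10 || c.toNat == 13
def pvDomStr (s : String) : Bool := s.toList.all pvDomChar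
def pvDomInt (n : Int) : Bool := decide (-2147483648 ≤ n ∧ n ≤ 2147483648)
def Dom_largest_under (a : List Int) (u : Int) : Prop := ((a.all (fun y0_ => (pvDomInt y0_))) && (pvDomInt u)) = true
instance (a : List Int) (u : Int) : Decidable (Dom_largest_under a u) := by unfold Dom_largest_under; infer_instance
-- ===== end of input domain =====

-- B rewrites A's iterative binary search as a recursive helper carrying the bounds; same cost, different decomposition.

-- midpoint bounds, cited by the ports' termination proofs
theorem pv_mid_bounds (b t : Int) (h : t - b > 1) :
    b < PySem.Int.floordiv (t + b + 1) 2 ∧ PySem.Int.floordiv (t + b + 1) 2 < t := by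
  rw [PySem.Int.floordiv_eq_ediv_of_pos (by omega)]
  omega

-- ===== PORT A =====
-- A's while-loop, as recursion on the interval width (t - b).
-- `a[m]` is always in range when the loop body runs (1 ≤ m ≤ len a - 2), so `.getD 0` is never taken.
def largest_under_go (a : List Int) (u : Int) (b t : Int) : Int :=
  if h : t - b > 1 then
    let m := PySem.Int.floordiv ((t + b) + 1) 2
    if (PySem.List.pyGet? a m).getD 0 > u then
      largest_under_go a u b m
    else
      largest_under_go a u m t
  else b
termination_by (t - b).toNat
decreasing_by
  · have := pv_mid_bounds b t h; omega
  · have := pv_mid_bounds b t h; omega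

def largest_under (a : List Int) (u : Int) : Int :=
  largest_under_go a u 0 ((a.length : Int) - 1)

-- ===== PORT B =====
-- B's recursive helper go(b, t); fuel (structural Nat recursion) only makes it total,
-- a.length steps always suffice since the interval starts at a.length - 1 and shrinks each call.
def largest_under_alt_go (a : List Int) (u : Int) : Int → Int → Nat → Int
  | b, _, 0 => b
  | b, t, Nat.succ n =>
    if t - b ≤ 1 then b
    else
      let m := PySem.Int.floordiv (b + t + 1) 2
      if (PySem.List.pyGet? a m).getD 0 > u then
        largest_under_alt_go a u b m n
      else
        largest_under_alt_go a u m t n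

def largest_under_alt (a : List Int) (u : Int) : Int :=
  largest_under_alt_go a u 0 ((a.length : Int) - 1) a.length

-- ===== PRECONDITION & SPEC =====
def Spec_largest_under (a : List Int) (u : Int) (out : Int) : Prop := out = largest_under_alt a u
instance (a : List Int) (u : Int) (out : Int) : Decidable (Spec_largest_under a u out) := by unfold Spec_largest_under; infer_instance

-- ===== CLAIM (what is proved, stated in full; the proofs are below) =====
def Claim_equal_largest_under : Prop := ∀ (a : List Int) (u : Int), Dom_largest_under a u → Spec_largest_under a u (largest_under a u)

-- ===== LEMMAS AND PROOFS =====

theorem pv_go_eq (a : List Int) (u : Int) (n : Nat) :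
    ∀ b t : Int, (t - b).toNat ≤ n →
      largest_under_alt_go a u b t n = largest_under_go a u b t := by
  induction n with
  | zero =>
    intro b t hn
    rw [largest_under_go]
    simp only [largest_under_alt_go]
    rw [dif_neg (by omega)]
  | succ n ih =>
    intro b t hn
    rw [largest_under_go]
    simp only [largest_under_alt_go]
    by_cases h : t - b > 1
    · rw [if_neg (by omega), dif_pos h]
      have hm := pv_mid_bounds b t h
      have harg : b + t + 1 = t + b + 1 := by ring
      rw [harg]
      split
      · exact ih b _ (by omega)
      · exact ih _ t (by omega)
    · rw [if_pos (by omega), dif_neg h]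

-- ===== VERDICT (by name: the statement is the Claim_ definition above) =====
theorem largest_under_spec : Claim_equal_largest_under := by
  intro a u _
  unfold Spec_largest_under largest_under largest_under_alt
  exact (pv_go_eq a u a.length 0 ((a.length : Int) - 1) (by omega)).symm
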